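-- pv_equiv track=rewrite | github.com/nyla111/COMP2050-gomoku | project/gomoku/qlearning_v2.py | is_threat
-- ===== SOURCE A (Python) =====
-- def is_threat(player, board, row, col, dx, dy, length):
--     count = 0
--     size = len(board)
--     # Check in both directions
--     for d in range(-length + 1, length):
--         x, y = row + d * dx, col + d * dy
--         if 0 <= x < size and 0 <= y < size and board[x][y] == player:
--             count += 1
--         elif 0 <= x < size and 0 <= y < size and board[x][y] is None:
--             continue
--         else:
--             count = 0
--         if count == 4:
--             return True
--     return False
-- ===== SOURCE B (Python) =====
-- def is_threat(player, board, row, col, dx, dy, length):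
--     size = len(board)
--     def tok(d):
--         x, y = row + d * dx, col + d * dy
--         if 0 <= x < size and 0 <= y < size:
--             cell = board[x][y]
--             if cell == player:
--                 return 'P'
--             if cell is None:
--                 return 'E'
--         return 'B'
--     toks = ''.join(tok(d) for d in range(-length + 1, length))
--     return any(seg.count('P') >= 4 for seg in toks.split('B'))
-- ===== Notes on version B (the rewrite author's own statement) =====
-- stated objective: alternative
-- what changed: A's single running-count-with-reset-and-early-return scan is replaced by a build-then-analyze decomposition: materialize the line as a P/E/B token string, split it on blockers 'B', and test whether any segment contains at least 4 player tokens.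
import Mathlib
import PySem

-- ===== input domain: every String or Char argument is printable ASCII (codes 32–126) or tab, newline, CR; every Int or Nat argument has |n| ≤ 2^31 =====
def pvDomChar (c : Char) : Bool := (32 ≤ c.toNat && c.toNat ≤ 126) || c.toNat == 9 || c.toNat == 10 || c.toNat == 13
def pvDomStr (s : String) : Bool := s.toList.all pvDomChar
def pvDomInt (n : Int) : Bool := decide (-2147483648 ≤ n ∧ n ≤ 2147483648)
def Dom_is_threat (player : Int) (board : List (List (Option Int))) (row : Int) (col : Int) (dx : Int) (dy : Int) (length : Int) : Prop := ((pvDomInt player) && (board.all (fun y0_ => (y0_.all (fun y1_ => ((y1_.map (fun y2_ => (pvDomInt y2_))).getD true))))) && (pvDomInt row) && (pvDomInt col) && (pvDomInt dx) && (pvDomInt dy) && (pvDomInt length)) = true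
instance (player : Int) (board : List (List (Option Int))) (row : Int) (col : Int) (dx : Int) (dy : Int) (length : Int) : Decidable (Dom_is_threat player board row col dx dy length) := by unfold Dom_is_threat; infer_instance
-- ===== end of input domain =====

-- B replaces A's running-count-with-reset scan by a build-tokens / split-into-segments /
-- count-per-segment decomposition (objective: alternative; same cost).

-- ===== PORT A =====
-- the running-count loop of A over the offsets d; `count = 0` branch kept literally
def isThreatLoop (player : Int) (board : List (List (Option Int))) (row : Int) (col : Int) (dx : Int) (dy : Int) : List Int → Int → Bool
  | [], _ => false
  | d :: ds, count =>
    let size : Int := board.length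
    let x := row + d * dx
    let y := col + d * dy
    -- board[x][y]; `none` = Python IndexError (ragged row), excluded by Pre_
    let cell : Option (Option Int) := (PySem.List.pyGet? board x).bind (fun r => PySem.List.pyGet? r y)
    if (0 ≤ x ∧ x < size ∧ 0 ≤ y ∧ y < size) ∧ cell = some (some player) then
      let count := count + 1
      if count = 4 then true else isThreatLoop player board row col dx dy ds count
    else if (0 ≤ x ∧ x < size ∧ 0 ≤ y ∧ y < size) ∧ cell = some none then
      -- `continue`: skips the count == 4 check
      isThreatLoop player board row col dx dy ds count
    else
      let count : Int := 0
      if count = 4 then true else isThreatLoop player board row col dx dy ds count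

def is_threat (player : Int) (board : List (List (Option Int))) (row : Int) (col : Int) (dx : Int) (dy : Int) (length : Int) : Bool :=
  isThreatLoop player board row col dx dy (PySem.List.pyRange (-length + 1) length 1) 0

-- ===== PORT B =====
-- Source B's tok(d): 'P' player stone, 'E' empty in-board, 'B' blocker (off-board / opponent)
def tokOf (player : Int) (board : List (List (Option Int))) (row : Int) (col : Int) (dx : Int) (dy : Int) (d : Int) : Char :=
  let size : Int := board.length
  let x := row + d * dx
  let y := col + d * dy
  if 0 ≤ x ∧ x < size ∧ 0 ≤ y ∧ y < size then
    match (PySem.List.pyGet? board x).bind (fun r => PySem.List.pyGet? r y) with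
    | some cell => if cell = some player then 'P' else if cell = none then 'E' else 'B'
    | none => 'B'   -- Python raises IndexError here (ragged row); outside Pre_
  else 'B'

-- toks.split('B') ported as List.splitOn 'B' on the character list (exact for a 1-char separator)
def is_threat_alt (player : Int) (board : List (List (Option Int))) (row : Int) (col : Int) (dx : Int) (dy : Int) (length : Int) : Bool :=
  let toks := (PySem.List.pyRange (-length + 1) length 1).map (tokOf player board row col dx dy)
  (toks.splitOn 'B').any (fun seg => decide (4 ≤ seg.count 'P'))

-- ===== PRECONDITION & SPEC =====
-- Pre_ excludes inputs on which some in-board cell (x, y) of the scanned line (x = row + d*dx,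
-- y = col + d*dy for an offset d of the scan, written below by solving for d) lies past the end
-- of a ragged (too short) row: Python raises IndexError on that access — except when A's early
-- `return True` fires before the bad access, a value B (which materializes all tokens first)
-- cannot reach; those early-return inputs are the ones excluded while A still returns.
def Pre_is_threat (player : Int) (board : List (List (Option Int))) (row : Int) (col : Int) (dx : Int) (dy : Int) (length : Int) : Prop :=
  ∀ x ∈ List.range board.length, ∀ y ∈ List.range board.length,
    ((((PySem.List.pyGet? board (x : Int)).getD []).length : Int) ≤ (y : Int)) →
    ¬ ( if dx = 0 ∧ dy = 0 then (x : Int) = row ∧ (y : Int) = col ∧ 1 ≤ length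
        else if dx = 0 then (x : Int) = row ∧ ((y : Int) - col) % dy = 0 ∧ (-length + 1 ≤ ((y : Int) - col) / dy ∧ ((y : Int) - col) / dy < length)
        else ((x : Int) - row) % dx = 0 ∧ (-length + 1 ≤ ((x : Int) - row) / dx ∧ ((x : Int) - row) / dx < length) ∧ (y : Int) = col + (((x : Int) - row) / dx) * dy )
instance (player : Int) (board : List (List (Option Int))) (row : Int) (col : Int) (dx : Int) (dy : Int) (length : Int) : Decidable (Pre_is_threat player board row col dx dy length) := by unfold Pre_is_threat; infer_instance

def pvWitness_is_threat : Int × List (List (Option Int)) × Int × Int × Int × Int × Int :=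
  (1, [[some 1, none], [none, some 2]], 0, 0, 0, 1, 2)

def Spec_is_threat (player : Int) (board : List (List (Option Int))) (row : Int) (col : Int) (dx : Int) (dy : Int) (length : Int) (out : Bool) : Prop := out = is_threat_alt player board row col dx dy length
instance (player : Int) (board : List (List (Option Int))) (row : Int) (col : Int) (dx : Int) (dy : Int) (length : Int) (out : Bool) : Decidable (Spec_is_threat player board row col dx dy length out) := by unfold Spec_is_threat; infer_instance

-- ===== CLAIM (what is proved, stated in full; the proofs are below) =====
def Claim_equal_is_threat : Prop := ∀ (player : Int) (board : List (List (Option Int))) (row : Int) (col : Int) (dx : Int) (dy : Int) (length : Int), Dom_is_threat player board row col dx dy length → Pre_is_threat player board row col dx dy length → Spec_is_threat player board row col dx dy length (is_threat player board row col dx dy length)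

-- ===== LEMMAS AND PROOFS =====

-- abstract form of A's loop over the token list
def tLoop : List Char → Int → Bool
  | [], _ => false
  | t :: ts, c =>
    if t = 'P' then (if c + 1 = 4 then true else tLoop ts (c + 1))
    else if t = 'E' then tLoop ts c
    else tLoop ts 0

theorem pvWitness_ok : Pre_is_threat pvWitness_is_threat.1 pvWitness_is_threat.2.1 pvWitness_is_threat.2.2.1 pvWitness_is_threat.2.2.2.1 pvWitness_is_threat.2.2.2.2.1 pvWitness_is_threat.2.2.2.2.2.1 pvWitness_is_threat.2.2.2.2.2.2 := by decide

theorem tok_eq_P (player : Int) (board : List (List (Option Int))) (row col dx dy d : Int)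
    (h1 : (0 ≤ row + d * dx ∧ row + d * dx < (board.length : Int) ∧ 0 ≤ col + d * dy ∧ col + d * dy < (board.length : Int)))
    (h2 : (PySem.List.pyGet? board (row + d * dx)).bind (fun r => PySem.List.pyGet? r (col + d * dy)) = some (some player)) :
    tokOf player board row col dx dy d = 'P' := by
  simp only [tokOf, h2, if_pos h1]
  simp

theorem tok_eq_E (player : Int) (board : List (List (Option Int))) (row col dx dy d : Int)
    (h1 : (0 ≤ row + d * dx ∧ row + d * dx < (board.length : Int) ∧ 0 ≤ col + d * dy ∧ col + d * dy < (board.length : Int)))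
    (h2 : (PySem.List.pyGet? board (row + d * dx)).bind (fun r => PySem.List.pyGet? r (col + d * dy)) = some none) :
    tokOf player board row col dx dy d = 'E' := by
  simp only [tokOf, h2, if_pos h1]
  simp

theorem tok_eq_B (player : Int) (board : List (List (Option Int))) (row col dx dy d : Int)
    (h1 : ¬ (((0 ≤ row + d * dx ∧ row + d * dx < (board.length : Int) ∧ 0 ≤ col + d * dy ∧ col + d * dy < (board.length : Int))) ∧ (PySem.List.pyGet? board (row + d * dx)).bind (fun r => PySem.List.pyGet? r (col + d * dy)) = some (some player)))
    (h2 : ¬ (((0 ≤ row + d * dx ∧ row + d * dx < (board.length : Int) ∧ 0 ≤ col + d * dy ∧ col + d * dy < (board.length : Int))) ∧ (PySem.List.pyGet? board (row + d * dx)).bind (fun r => PySem.List.pyGet? r (col + d * dy)) = some none)) :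
    tokOf player board row col dx dy d = 'B' := by
  simp only [tokOf]
  split
  · rename_i hg
    cases hc : (PySem.List.pyGet? board (row + d * dx)).bind (fun r => PySem.List.pyGet? r (col + d * dy)) with
    | none => rfl
    | some cell =>
      have hP : ¬ cell = some player := fun h => h1 ⟨hg, by rw [hc, h]⟩
      have hE : ¬ cell = none := fun h => h2 ⟨hg, by rw [hc, h]⟩
      simp [hP, hE]
  · rfl

theorem isThreatLoop_eq_tLoop (player : Int) (board : List (List (Option Int))) (row col dx dy : Int)
    (ds : List Int) (c : Int) :
    isThreatLoop player board row col dx dy ds c = tLoop (ds.map (tokOf player board row col dx dy)) c := by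
  induction ds generalizing c with
  | nil => rfl
  | cons d ds ih =>
    rw [List.map_cons, isThreatLoop]
    by_cases h1 : (((0 ≤ row + d * dx ∧ row + d * dx < (board.length : Int) ∧ 0 ≤ col + d * dy ∧ col + d * dy < (board.length : Int))) ∧ (PySem.List.pyGet? board (row + d * dx)).bind (fun r => PySem.List.pyGet? r (col + d * dy)) = some (some player))
    · rw [tok_eq_P player board row col dx dy d h1.1 h1.2]
      simp only [tLoop, if_pos h1]
      split_ifs <;> first | rfl | exact ih _
    · by_cases h2 : (((0 ≤ row + d * dx ∧ row + d * dx < (board.length : Int) ∧ 0 ≤ col + d * dy ∧ col + d * dy < (board.length : Int))) ∧ (PySem.List.pyGet? board (row + d * dx)).bind (fun r => PySem.List.pyGet? r (col + d * dy)) = some none)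
      · rw [tok_eq_E player board row col dx dy d h2.1 h2.2]
        simp only [tLoop, if_neg h1, if_pos h2]
        simp only [show ('E' : Char) ≠ 'P' by decide]
        exact ih _
      · rw [tok_eq_B player board row col dx dy d h1 h2]
        simp only [tLoop, if_neg h1, if_neg h2]
        simp only [show ('B' : Char) ≠ 'P' by decide, show ('B' : Char) ≠ 'E' by decide]
        simpa using ih 0

theorem tok_mem (player : Int) (board : List (List (Option Int))) (row col dx dy d : Int) :
    tokOf player board row col dx dy d = 'P' ∨ tokOf player board row col dx dy d = 'E' ∨
    tokOf player board row col dx dy d = 'B' := by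
  simp only [tokOf]
  split
  · split
    · split_ifs <;> simp
    · simp
  · simp

theorem splitOn_cons_char (t : Char) (ts : List Char) :
    (t :: ts).splitOn 'B' = if t = 'B' then [] :: ts.splitOn 'B' else (ts.splitOn 'B').modifyHead (t :: ·) := by
  simp only [List.splitOn, List.splitOnP_cons, beq_iff_eq]

theorem tLoop_eq_split (L : List Char) (c : Int) (hc0 : 0 ≤ c) (hc3 : c ≤ 3)
    (hL : ∀ t ∈ L, t = 'P' ∨ t = 'E' ∨ t = 'B') :
    tLoop L c = (match L.splitOn 'B' with
      | [] => false
      | s :: rest => (decide (4 ≤ c + (s.count 'P' : Int))) || rest.any (fun seg => decide (4 ≤ seg.count 'P'))) := by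
  induction L generalizing c with
  | nil =>
    simp only [tLoop, List.splitOn_nil]
    simp only [List.count_nil]
    simp only [Nat.cast_zero, add_zero, List.any_nil, Bool.or_false]
    rw [show (decide (4 ≤ c)) = false from by simp; omega]
  | cons t ts ih =>
    obtain ⟨s, rest, hs⟩ : ∃ s rest, ts.splitOn 'B' = s :: rest := by
      cases h : ts.splitOn 'B' with
      | nil => exact absurd h (List.splitOnP_ne_nil _ _)
      | cons a b => exact ⟨a, b, rfl⟩
    have hrec := fun (c : Int) h0 h3 => (ih c h0 h3 (fun t ht => hL t (List.mem_cons_of_mem _ ht))).trans (by rw [hs])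
    rcases hL t List.mem_cons_self with hP | hE | hB
    · subst hP
      rw [splitOn_cons_char]
      simp only [if_neg (show ('P' : Char) ≠ 'B' by decide), hs, List.modifyHead_cons]
      simp only [tLoop, List.count_cons_self]
      by_cases h4 : c + 1 = 4
      · rw [if_pos h4]
        have : decide (4 ≤ c + ((s.count 'P' : Nat) + 1 : Nat)) = true := by
          simp; omega
        rw [this]; rfl
      · rw [if_neg h4, hrec (c + 1) (by omega) (by omega)]
        have : (decide (4 ≤ c + ((s.count 'P' : Nat) + 1 : Nat))) = (decide (4 ≤ c + 1 + (s.count 'P' : Nat))) := by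
          rw [decide_eq_decide]; push_cast; omega
        rw [this]
        simp
    · subst hE
      rw [splitOn_cons_char]
      simp only [if_neg (show ('E' : Char) ≠ 'B' by decide), hs, List.modifyHead_cons]
      simp only [tLoop, if_neg (show ('E' : Char) ≠ 'P' by decide)]
      rw [hrec c hc0 hc3]
      simp
    · subst hB
      rw [splitOn_cons_char]
      simp only [tLoop, if_neg (show ('B' : Char) ≠ 'P' by decide), if_neg (show ('B' : Char) ≠ 'E' by decide)]
      rw [hrec 0 (by omega) (by omega)]
      simp [hs]
      exact fun h => absurd h (by omega)

-- ===== VERDICT (by name: the statement is the Claim_ definition above) =====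
theorem is_threat_spec : Claim_equal_is_threat := by
  intro player board row col dx dy length _hDom _hPre
  unfold Spec_is_threat is_threat is_threat_alt
  rw [isThreatLoop_eq_tLoop]
  rw [tLoop_eq_split _ 0 (by omega) (by omega) (by
    intro t ht
    obtain ⟨d, _, rfl⟩ := List.mem_map.mp ht
    exact tok_mem player board row col dx dy d)]
  obtain ⟨s, rest, hs⟩ : ∃ s rest, ((PySem.List.pyRange (-length + 1) length 1).map (tokOf player board row col dx dy)).splitOn 'B' = s :: rest := by
    cases h : ((PySem.List.pyRange (-length + 1) length 1).map (tokOf player board row col dx dy)).splitOn 'B' with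
    | nil => exact absurd h (List.splitOnP_ne_nil _ _)
    | cons a b => exact ⟨a, b, rfl⟩
  rw [hs]
  simp
  rw [hs]
  simp
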